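-- pv_equiv track=rewrite | github.com/johnmzz/KG | PoG/utils.py | add_relations_to_path_with_all_R
-- ===== SOURCE A (Python) =====
-- def add_relations_to_path_with_all_R(graph, path):
--     """Add all relation information to a completed path, generating different paths accordingly."""
--     import itertools
--
--     # Build a list of possible relations between each pair of nodes
--     relations_list = []
--     for i in range(len(path) - 1):
--         node = path[i]
--         next_node = path[i + 1]
--         relations_dict = graph[node][next_node]
--         relation_strings = []
--         for direction, relations in relations_dict.items():
--             direction_symbol = " ->" if direction == 'forward' else " <-"
--             if isinstance(relations, set):
--                 relations = list(relations)
--             for relation in relations: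
--                 relation_strings.append(f"{direction_symbol} {relation} {direction_symbol}")
--         relations_list.append(relation_strings)
--
--     # Generate all combinations of relations
--     relation_combinations = list(itertools.product(*relations_list))
--
--     # For each combination, build the full path
--     paths = []
--     for combination in relation_combinations:
--         full_path = []
--         for i in range(len(path) - 1):
--             node = path[i]
--             relation_string = "{" + combination[i] + "}"
--             full_path.append(node)
--             full_path.append(relation_string)
--         full_path.append(path[-1])
--         paths.append(full_path)
--     return paths
-- ===== SOURCE B (Python) =====
-- def _sym(direction):
--     return " ->" if direction == 'forward' else " <-"
--
--
-- def add_relations_to_path_with_all_R(graph, path):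
--     """Add all relation information to a completed path, generating different paths accordingly.
--
--     Single incremental fold: extend every partial path with each labeled option of the
--     current edge, instead of materializing itertools.product and reconstructing afterwards.
--     """
--     partials = [path[:1]]
--     for node, nxt in zip(path, path[1:]):
--         options = ["{" + _sym(d) + " " + r + " " + _sym(d) + "}"
--                    for d, rs in graph[node][nxt].items() for r in rs]
--         partials = [p + [opt, nxt] for p in partials for opt in options]
--     return partials
-- ===== Notes on version B (the rewrite author's own statement) =====
-- stated objective: alternative
-- what changed: Replaces the itertools.product materialization plus a separate index-driven reconstruction pass with one incremental fold that extends every partial path in place with each labeled option of the current edge.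
import Mathlib
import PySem

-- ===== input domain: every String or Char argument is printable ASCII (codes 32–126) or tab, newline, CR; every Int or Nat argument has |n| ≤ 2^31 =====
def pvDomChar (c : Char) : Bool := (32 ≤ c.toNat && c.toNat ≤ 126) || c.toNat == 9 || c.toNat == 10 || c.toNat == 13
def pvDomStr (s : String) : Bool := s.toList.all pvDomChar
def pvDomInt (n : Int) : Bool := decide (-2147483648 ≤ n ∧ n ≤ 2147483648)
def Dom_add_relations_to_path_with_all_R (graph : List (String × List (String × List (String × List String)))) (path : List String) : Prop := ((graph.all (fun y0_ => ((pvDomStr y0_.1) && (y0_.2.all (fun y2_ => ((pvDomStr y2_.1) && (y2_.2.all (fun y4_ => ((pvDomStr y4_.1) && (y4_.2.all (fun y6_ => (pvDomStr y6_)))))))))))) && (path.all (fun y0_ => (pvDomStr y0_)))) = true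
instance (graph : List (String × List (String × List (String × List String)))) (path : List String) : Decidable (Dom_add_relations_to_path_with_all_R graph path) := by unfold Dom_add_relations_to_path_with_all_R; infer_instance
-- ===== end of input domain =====

-- B replaces itertools.product + a second reconstruction pass with one incremental fold over the edges.

-- ===== PORT A =====
-- first-match association-list lookup = Python dict lookup under the stated convention
def pvLookup {A : Type} (d : List (String × A)) (k : String) : Option A :=
  (d.find? (fun p => p.1 == k)).map (·.2)

def pvSym (direction : String) : String := if direction == "forward" then " ->" else " <-"

-- the relation_strings loop of A (append per relation)
def pvRelStrings (relations_dict : List (String × List String)) : List String :=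
  relations_dict.foldl (fun acc dr =>
    acc ++ dr.2.map (fun r => pvSym dr.1 ++ " " ++ r ++ " " ++ pvSym dr.1)) []

-- itertools.product over lists of strings (first list varies slowest)
def pvProduct : List (List String) → List (List String)
  | [] => [[]]
  | l :: ls => l.flatMap (fun x => (pvProduct ls).map (fun c => x :: c))

-- A's first loop; indices from range(len(path)-1) are in bounds so Python path[i] = getD
def pvRelList (graph : List (String × List (String × List (String × List String)))) (path : List String) : List (List String) :=
  (List.range (path.length - 1)).map (fun i =>
    pvRelStrings ((pvLookup ((pvLookup graph (path.getD i "")).getD []) (path.getD (i + 1) "")).getD []))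

-- A's reconstruction loop for one combination; path[-1] on the nonempty paths admitted by Pre_ is getLastD
def pvRecon (path : List String) (combination : List String) : List String :=
  ((List.range (path.length - 1)).foldl (fun fp i =>
    fp ++ [path.getD i "", "{" ++ combination.getD i "" ++ "}"]) []) ++ [path.getLastD ""]

def add_relations_to_path_with_all_R (graph : List (String × List (String × List (String × List String)))) (path : List String) : List (List String) :=
  (pvProduct (pvRelList graph path)).map (pvRecon path)

-- ===== PORT B =====
-- the labeled, brace-wrapped options of one edge (B's inner comprehension)
def pvOpts (graph : List (String × List (String × List (String × List String)))) (node nxt : String) : List String :=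
  ((pvLookup ((pvLookup graph node).getD []) nxt).getD []).flatMap
    (fun dr => dr.2.map (fun r => "{" ++ pvSym dr.1 ++ " " ++ r ++ " " ++ pvSym dr.1 ++ "}"))

def add_relations_to_path_with_all_R_alt (graph : List (String × List (String × List (String × List String)))) (path : List String) : List (List String) :=
  (path.zip path.tail).foldl (fun partials e =>
    partials.flatMap (fun p => (pvOpts graph e.1 e.2).map (fun opt => p ++ [opt, e.2])))
    [path.take 1]

-- ===== PRECONDITION & SPEC =====
-- Pre_ excludes exactly the inputs on which the Python A raises: an empty path (IndexError at
-- path[-1]) and paths with a consecutive pair missing from the nested dicts (KeyError).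
def Pre_add_relations_to_path_with_all_R (graph : List (String × List (String × List (String × List String)))) (path : List String) : Prop :=
  path ≠ [] ∧ (path.zip path.tail).all (fun e =>
    (pvLookup graph e.1).elim false (fun d => (pvLookup d e.2).isSome)) = true
instance (graph : List (String × List (String × List (String × List String)))) (path : List String) : Decidable (Pre_add_relations_to_path_with_all_R graph path) := by unfold Pre_add_relations_to_path_with_all_R; infer_instance

def pvWitness_add_relations_to_path_with_all_R : (List (String × List (String × List (String × List String)))) × List String :=
  ([("a", [("b", [("forward", ["r"])])])], ["a", "b"])

def Spec_add_relations_to_path_with_all_R (graph : List (String × List (String × List (String × List String)))) (path : List String) (out : List (List String)) : Prop := out = add_relations_to_path_with_all_R_alt graph path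
instance (graph : List (String × List (String × List (String × List String)))) (path : List String) (out : List (List String)) : Decidable (Spec_add_relations_to_path_with_all_R graph path out) := by unfold Spec_add_relations_to_path_with_all_R; infer_instance

-- ===== CLAIM (what is proved, stated in full; the proofs are below) =====
def Claim_equal_add_relations_to_path_with_all_R : Prop := ∀ (graph : List (String × List (String × List (String × List String)))) (path : List String), Dom_add_relations_to_path_with_all_R graph path → Pre_add_relations_to_path_with_all_R graph path → Spec_add_relations_to_path_with_all_R graph path (add_relations_to_path_with_all_R graph path)

-- ===== LEMMAS AND PROOFS =====

-- the common recursive specification: paths after the leading node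
def pvRec (graph : List (String × List (String × List (String × List String)))) : String → List String → List (List String)
  | _, [] => [[]]
  | x, y :: ys => (pvOpts graph x y).flatMap (fun o => (pvRec graph y ys).map (fun t => o :: y :: t))

theorem pvRec_altB (graph : List (String × List (String × List (String × List String)))) (ys : List String) (x : String) (acc : List (List String)) :
    ((x :: ys).zip ys).foldl (fun partials e =>
      partials.flatMap (fun p => (pvOpts graph e.1 e.2).map (fun opt => p ++ [opt, e.2]))) acc
    = acc.flatMap (fun p => (pvRec graph x ys).map (fun t => p ++ t)) := by
  induction ys generalizing x acc with
  | nil => simp [pvRec]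
  | cons y ys ih =>
    simp only [List.zip_cons_cons, List.foldl_cons, ih, pvRec]
    simp [List.flatMap_assoc, List.map_flatMap, List.flatMap_map, List.map_map,
      Function.comp_def, List.append_assoc]

-- A's unwrapped relation-string list for one edge
def pvRaw (graph : List (String × List (String × List (String × List String)))) (x y : String) : List String :=
  pvRelStrings ((pvLookup ((pvLookup graph x).getD []) y).getD [])

theorem pvRelList_cons (graph : List (String × List (String × List (String × List String)))) (x y : String) (ys : List String) :
    pvRelList graph (x :: y :: ys) = pvRaw graph x y :: pvRelList graph (y :: ys) := by
  simp [pvRelList, pvRaw, List.range_succ_eq_map, List.map_map]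

theorem pvRecon_cons (x y : String) (ys : List String) (c : String) (cs : List String) :
    pvRecon (x :: y :: ys) (c :: cs) = x :: ("{" ++ c ++ "}") :: pvRecon (y :: ys) cs := by
  simp only [pvRecon, PySem.List.foldl_append_eq_flatMap]
  simp [List.range_succ_eq_map, List.flatMap_map]

theorem pvOpts_eq_map_raw (graph : List (String × List (String × List (String × List String)))) (x y : String) :
    pvOpts graph x y = (pvRaw graph x y).map (fun s => "{" ++ s ++ "}") := by
  simp only [pvOpts, pvRaw, pvRelStrings, PySem.List.foldl_append_eq_flatMap]
  simp [List.map_flatMap, List.map_map, Function.comp_def, String.append_assoc]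

theorem pvRec_A (graph : List (String × List (String × List (String × List String)))) (ys : List String) (x : String) :
    add_relations_to_path_with_all_R graph (x :: ys) = (pvRec graph x ys).map (fun t => x :: t) := by
  induction ys generalizing x with
  | nil => simp [add_relations_to_path_with_all_R, pvRelList, pvRecon, pvProduct, pvRec]
  | cons y ys ih =>
    show (pvProduct (pvRelList graph (x :: y :: ys))).map (pvRecon (x :: y :: ys)) = _
    rw [pvRelList_cons]
    simp only [pvProduct, List.map_flatMap, List.map_map]
    have hmap : ∀ c : String,
        (pvProduct (pvRelList graph (y :: ys))).map (fun cs => pvRecon (x :: y :: ys) (c :: cs))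
        = (pvRec graph y ys).map (fun t => x :: ("{" ++ c ++ "}") :: y :: t) := by
      intro c
      calc (pvProduct (pvRelList graph (y :: ys))).map (fun cs => pvRecon (x :: y :: ys) (c :: cs))
          = (pvProduct (pvRelList graph (y :: ys))).map
              ((fun t => x :: ("{" ++ c ++ "}") :: t) ∘ pvRecon (y :: ys)) := by
            simp [Function.comp_def, pvRecon_cons]
        _ = ((pvProduct (pvRelList graph (y :: ys))).map (pvRecon (y :: ys))).map
              (fun t => x :: ("{" ++ c ++ "}") :: t) := by rw [List.map_map]
        _ = (pvRec graph y ys).map (fun t => x :: ("{" ++ c ++ "}") :: y :: t) := by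
            rw [show (pvProduct (pvRelList graph (y :: ys))).map (pvRecon (y :: ys))
                  = add_relations_to_path_with_all_R graph (y :: ys) from rfl, ih y]
            simp [List.map_map]
    simp only [Function.comp_def, hmap]
    rw [pvRec, pvOpts_eq_map_raw]
    simp [List.flatMap_map, List.map_flatMap, List.map_map, Function.comp_def]

-- ===== VERDICT (by name: the statement is the Claim_ definition above) =====
theorem add_relations_to_path_with_all_R_spec : Claim_equal_add_relations_to_path_with_all_R := by
  intro graph path _ hpre
  unfold Spec_add_relations_to_path_with_all_R
  obtain ⟨x, ys, rfl⟩ : ∃ x ys, path = x :: ys := by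
    cases path with
    | nil => exact absurd rfl hpre.1
    | cons a l => exact ⟨a, l, rfl⟩
  rw [pvRec_A]
  show _ = List.foldl _ [[x]] ((x :: ys).zip ys)
  rw [pvRec_altB]
  simp
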